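-- pv_equiv track=rewrite | github.com/DataFog/datafog-api | app/processor.py | find_pii_in_text
-- ===== SOURCE A (Python) =====
-- def find_pii_in_text(
--     text: str, start_index: int, pii: str, seen: set
-- ) -> tuple[int, int]:
--     """Find pii in the original text and return the start and end index"""
--     start = None
--     end = None
--     # Currently returns the 0-based start index and the end index non-inclusive
--     while start_index < len(text):
--         start = text.find(pii, start_index)
--         if start == -1:
--             # unable to find PII, return None
--             return (None, None)
--
--         end = start + len(pii)
--
--         if start > 0 and text[start - 1 : start].isalnum():
--             # if the start is not the first char and the char before it is an alpha numeric
--             # we have found a substring and should continue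
--             start_index = start + 1
--             # continue search after start
--             start = None
--             end = None
--             continue
--         elif end < len(text) and text[end : end + 1].isalnum():
--             # if end is not the last char in the text and the char after it is an alpha numeric
--             # we have found a substring and should continue
--             start_index = start + 1
--             # continue search after start
--             start = None
--             end = None
--             continue
--         elif start in seen:
--             # we have previously found this pii and should continue
--             start_index = start + 1
--             # continue search after start
--             start = None
--             end = None
--             continue
--
--         # Valid PII found, break out of loop
--         break
--
--     # add start to the set of seen indices
--     seen.add(start)
--     return (start, end)
-- ===== SOURCE B (Python) =====
-- def find_pii_in_text(
--     text: str, start_index: int, pii: str, seen: set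
-- ) -> tuple[int, int]:
--     """Find pii in the original text and return the start and end index"""
--     n, m = len(text), len(pii)
--     # Python's str.find treats a negative start like a slice bound: from the end, clamped at 0
--     p0 = start_index if start_index >= 0 else max(0, n + start_index)
--     for p in range(p0, n - m + 1):
--         if (text[p:p + m] == pii
--                 and not (p > 0 and text[p - 1].isalnum())
--                 and not (p + m < n and text[p + m].isalnum())
--                 and p not in seen):
--             seen.add(p)
--             return (p, p + m)
--     return (None, None)
-- ===== Notes on version B (the rewrite author's own statement) =====
-- stated objective: simpler
-- what changed: A's stateful while loop that repeatedly calls str.find and restarts just after each rejected hit is replaced by one for-loop over the candidate start positions that checks occurrence, the two word-boundary conditions and seen in a single conjunction.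
-- outside the precondition, e.g. on find_pii_in_text('b ', 1, '', set()): A returns (None, None), B returns (2, 2)
import Mathlib
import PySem

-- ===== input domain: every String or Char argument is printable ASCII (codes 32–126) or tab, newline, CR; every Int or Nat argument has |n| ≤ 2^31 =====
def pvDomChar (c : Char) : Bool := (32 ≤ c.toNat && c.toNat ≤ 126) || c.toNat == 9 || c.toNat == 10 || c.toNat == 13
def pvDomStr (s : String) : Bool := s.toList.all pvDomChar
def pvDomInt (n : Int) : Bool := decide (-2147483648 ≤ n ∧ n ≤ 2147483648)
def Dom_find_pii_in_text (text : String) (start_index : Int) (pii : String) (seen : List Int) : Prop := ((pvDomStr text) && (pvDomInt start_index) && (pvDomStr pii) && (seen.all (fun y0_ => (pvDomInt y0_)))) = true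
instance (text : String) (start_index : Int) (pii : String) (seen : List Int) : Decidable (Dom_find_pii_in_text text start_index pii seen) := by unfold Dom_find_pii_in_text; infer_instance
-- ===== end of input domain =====

-- B replaces A's repeated str.find / reset-and-restart while loop by one direct scan over the
-- candidate start positions with all acceptance conditions checked in one place (objective:
-- simpler).  A mutates `seen` in place (adding the found index, or None on some miss paths);
-- B adds only the found index, and the equivalence proved here is about the RETURN value only.

-- ===== PORT A =====
-- the clamped effective start position of str.find (needed by the port's termination proof)
def pvSt (n s : Int) : Int := if s < 0 then (if s + n < 0 then 0 else s + n) else s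

-- normal form of s.find(sub, start) with the end bound omitted (termination of the loop needs it)
theorem pvFF (cs ps : List Char) (s : Int) :
    PySem.Chars.findFrom cs ps s none =
      (if (cs.length : Int) < pvSt (cs.length : Int) s then -1
       else if PySem.Chars.find (cs.drop (pvSt (cs.length : Int) s).toNat) ps = -1 then -1
       else pvSt (cs.length : Int) s + PySem.Chars.find (cs.drop (pvSt (cs.length : Int) s).toNat) ps) := by
  unfold PySem.Chars.findFrom pvSt
  simp only [Int.toNat_natCast, List.take_length]

theorem pvFindFrom_ge (cs ps : List Char) (s : Int)
    (h : ¬ PySem.Chars.findFrom cs ps s none = -1) :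
    s ≤ PySem.Chars.findFrom cs ps s none ∧ 0 ≤ PySem.Chars.findFrom cs ps s none := by
  rw [pvFF] at h ⊢
  have hr := PySem.Chars.neg_one_le_find (cs.drop (pvSt (cs.length : Int) s).toNat) ps
  have hst : s ≤ pvSt (cs.length : Int) s ∧ 0 ≤ pvSt (cs.length : Int) s := by
    unfold pvSt; split_ifs <;> omega
  split_ifs at h ⊢ <;> omega

-- A's while loop: find the next occurrence from start_index, reject it (and restart just after
-- it) if it is glued to an alphanumeric character or already seen, else return it.
def pvALoop (cs ps : List Char) (seen : List Int) (start_index : Int) : Option Int × Option Int :=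
  if _h : start_index < (cs.length : Int) then
    let start := PySem.Chars.findFrom cs ps start_index none
    if _h1 : start = -1 then (none, none)
    else
      let e := start + (ps.length : Int)
      if 0 < start ∧ PySem.Chars.strIsalnum (PySem.List.slice cs (some (start - 1)) (some start)) then
        pvALoop cs ps seen (start + 1)
      else if e < (cs.length : Int) ∧ PySem.Chars.strIsalnum (PySem.List.slice cs (some e) (some (e + 1))) then
        pvALoop cs ps seen (start + 1)
      else if start ∈ seen then
        pvALoop cs ps seen (start + 1)
      else
        (some start, some e)
  else (none, none)
termination_by ((cs.length : Int) - start_index).toNat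
decreasing_by
  all_goals
    have h2 := pvFindFrom_ge cs ps start_index _h1
    omega

def find_pii_in_text (text : String) (start_index : Int) (pii : String) (seen : List Int) : Option Int × Option Int :=
  pvALoop text.toList pii.toList seen start_index

-- ===== PORT B =====
-- text[i].isalnum() for an index i that B's guards keep in range
def pvAlnumAt (cs : List Char) (i : Int) : Bool :=
  match PySem.List.pyGet? cs i with
  | some c => PySem.Chars.isalnum c
  | none => false

-- B's for-loop over the candidate positions, with its early return
def pvBGo (cs ps : List Char) (seen : List Int) : List Int → Option Int × Option Int
  | [] => (none, none)
  | p :: rest =>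
      if PySem.List.slice cs (some p) (some (p + (ps.length : Int))) = ps
          ∧ ¬(0 < p ∧ pvAlnumAt cs (p - 1) = true)
          ∧ ¬(p + (ps.length : Int) < (cs.length : Int) ∧ pvAlnumAt cs (p + (ps.length : Int)) = true)
          ∧ p ∉ seen then
        (some p, some (p + (ps.length : Int)))
      else
        pvBGo cs ps seen rest

def find_pii_in_text_alt (text : String) (start_index : Int) (pii : String) (seen : List Int) : Option Int × Option Int :=
  let cs := text.toList
  let ps := pii.toList
  let p0 : Int := if 0 ≤ start_index then start_index else max 0 ((cs.length : Int) + start_index)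
  pvBGo cs ps seen (PySem.List.pyRange p0 ((cs.length : Int) - (ps.length : Int) + 1) 1)

-- ===== PRECONDITION & SPEC =====
-- Pre_ excludes only the empty pii: a degenerate search pattern on which A's set of tested
-- positions is an accident of str.find's empty-match and negative-start clamping (the position at
-- the very end of the text is sometimes tested and sometimes not), so neither behaviour is the
-- specified one.
def Pre_find_pii_in_text (text : String) (start_index : Int) (pii : String) (seen : List Int) : Prop := pii ≠ ""
instance (text : String) (start_index : Int) (pii : String) (seen : List Int) : Decidable (Pre_find_pii_in_text text start_index pii seen) := by unfold Pre_find_pii_in_text; infer_instance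
def pvWitness_find_pii_in_text : String × Int × String × List Int := ("a b", 0, "b", [5])

def Spec_find_pii_in_text (text : String) (start_index : Int) (pii : String) (seen : List Int) (out : Option Int × Option Int) : Prop := out = find_pii_in_text_alt text start_index pii seen
instance (text : String) (start_index : Int) (pii : String) (seen : List Int) (out : Option Int × Option Int) : Decidable (Spec_find_pii_in_text text start_index pii seen out) := by unfold Spec_find_pii_in_text; infer_instance

-- ===== CLAIM (what is proved, stated in full; the proofs are below) =====
def Claim_equal_find_pii_in_text : Prop := ∀ (text : String) (start_index : Int) (pii : String) (seen : List Int), Dom_find_pii_in_text text start_index pii seen → Pre_find_pii_in_text text start_index pii seen → Spec_find_pii_in_text text start_index pii seen (find_pii_in_text text start_index pii seen)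

-- ===== LEMMAS AND PROOFS =====

-- text[p:p+m] == pii says exactly that pii is a prefix of text[p:]
theorem pvMatch_iff (cs ps : List Char) (p : Nat) :
    PySem.List.slice cs (some (p : Int)) (some ((p : Int) + (ps.length : Int))) = ps ↔
      ps <+: cs.drop p := by
  rw [PySem.List.slice_natCast_add]
  constructor
  · intro h
    exact List.prefix_iff_eq_take.mpr h.symm
  · intro h
    exact (List.prefix_iff_eq_take.mp h).symm

-- text[i:i+1].isalnum() agrees with text[i].isalnum() for an in-range i
theorem pvAlnumSlice_eq (cs : List Char) (i : Nat) (hi : i < cs.length) :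
    PySem.Chars.strIsalnum (PySem.List.slice cs (some (i : Int)) (some ((i : Int) + 1)))
      = pvAlnumAt cs (i : Int) := by
  have h1 : PySem.List.slice cs (some (i : Int)) (some ((i : Int) + 1)) = List.take 1 (List.drop i cs) := by
    have h := PySem.List.slice_natCast_add cs i 1
    simpa using h
  have h2 : List.take 1 (List.drop i cs) = [cs[i]] := by
    rw [List.drop_eq_getElem_cons hi, List.take_succ_cons, List.take_zero]
  rw [h1, h2]
  simp [PySem.Chars.strIsalnum, pvAlnumAt, hi]

-- if no position in the list carries an occurrence, B's loop falls through
theorem pvBGo_nil (cs ps : List Char) (seen : List Int) (l : List Int)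
    (h : ∀ p ∈ l, ¬ PySem.List.slice cs (some p) (some (p + (ps.length : Int))) = ps) :
    pvBGo cs ps seen l = (none, none) := by
  induction l with
  | nil => rfl
  | cons p rest ih =>
      simp only [pvBGo]
      rw [if_neg]
      · exact ih (fun q hq => h q (List.mem_cons_of_mem _ hq))
      · rintro ⟨hc1, -⟩
        exact h p (by simp) hc1

-- B's loop skips occurrence-free positions
theorem pvBGo_skip (cs ps : List Char) (seen : List Int) (b : Int) :
    ∀ (d : Nat) (a f : Int), f - a = (d : Int) →
      (∀ p, a ≤ p → p < f → ¬ PySem.List.slice cs (some p) (some (p + (ps.length : Int))) = ps) →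
      pvBGo cs ps seen (PySem.List.pyRange a b) = pvBGo cs ps seen (PySem.List.pyRange f b) := by
  intro d
  induction d with
  | zero =>
      intro a f hd _
      have : a = f := by omega
      rw [this]
  | succ d ih =>
      intro a f hd h
      by_cases hab : a < b
      · rw [PySem.List.pyRange_one_cons hab]
        simp only [pvBGo]
        rw [if_neg]
        · exact ih (a + 1) f (by omega) (fun p hp1 hp2 => h p (by omega) hp2)
        · rintro ⟨hc1, -⟩
          exact h a le_rfl (by omega) hc1
      · have e1 : PySem.List.pyRange a b = [] := by
          rw [List.eq_nil_iff_forall_not_mem]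
          intro x hx; rw [PySem.List.mem_pyRange_one] at hx; omega
        have e2 : PySem.List.pyRange f b = [] := by
          rw [List.eq_nil_iff_forall_not_mem]
          intro x hx; rw [PySem.List.mem_pyRange_one] at hx; omega
        rw [e1, e2]

-- terminal case: start_index has reached the end of the text
theorem pvEndCase (cs ps : List Char) (seen : List Int) (hm : ps ≠ []) :
    pvALoop cs ps seen (cs.length : Int) =
      pvBGo cs ps seen (PySem.List.pyRange (cs.length : Int) ((cs.length : Int) - (ps.length : Int) + 1)) := by
  have hm1 : 0 < ps.length := List.length_pos_of_ne_nil hm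
  rw [pvALoop]
  rw [dif_neg (by omega : ¬ ((cs.length : Int) < (cs.length : Int)))]
  have e : PySem.List.pyRange (cs.length : Int) ((cs.length : Int) - (ps.length : Int) + 1) = [] := by
    rw [List.eq_nil_iff_forall_not_mem]
    intro x hx; rw [PySem.List.mem_pyRange_one] at hx; omega
  rw [e]
  rfl

-- main loop invariant: from any in-range nonnegative start the two loops agree
theorem pvMain (cs ps : List Char) (seen : List Int) (hm : ps ≠ []) :
    ∀ (fuel k : Nat), cs.length - k ≤ fuel → k ≤ cs.length →
      pvALoop cs ps seen (k : Int) =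
        pvBGo cs ps seen (PySem.List.pyRange (k : Int) ((cs.length : Int) - (ps.length : Int) + 1)) := by
  have hm1 : 0 < ps.length := List.length_pos_of_ne_nil hm
  intro fuel
  induction fuel with
  | zero =>
      intro k hf hk
      have : k = cs.length := by omega
      rw [this]; exact pvEndCase cs ps seen hm
  | succ fuel ih =>
      intro k hf hk
      by_cases hkn : k = cs.length
      · rw [hkn]; exact pvEndCase cs ps seen hm
      · have hk' : k < cs.length := by omega
        rw [pvALoop]
        rw [dif_pos (by exact_mod_cast hk' : (k : Int) < (cs.length : Int))]
        rw [PySem.Chars.findFrom_natCast cs ps k hk]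
        by_cases hneg : PySem.Chars.find (cs.drop k) ps = -1
        · rw [if_pos hneg]
          rw [dif_pos rfl]
          have hninf : ¬ ps <:+: cs.drop k := (PySem.Chars.find_eq_neg_one_iff _ _).mp hneg
          refine (pvBGo_nil cs ps seen _ ?_).symm
          intro p hp hmatch
          rw [PySem.List.mem_pyRange_one] at hp
          obtain ⟨q, rfl⟩ : ∃ q : Nat, p = (q : Int) := ⟨p.toNat, by omega⟩
          have hq : k ≤ q := by exact_mod_cast hp.1
          have hpref : ps <+: cs.drop q := (pvMatch_iff cs ps q).mp hmatch
          have hdq : cs.drop q = (cs.drop k).drop (q - k) := by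
            rw [List.drop_drop]; congr 1; omega
          rw [hdq] at hpref
          exact hninf (hpref.isInfix.trans (List.drop_suffix _ _).isInfix)
        · rw [if_neg hneg]
          have hr0 : 0 ≤ PySem.Chars.find (cs.drop k) ps := by
            have := PySem.Chars.neg_one_le_find (cs.drop k) ps
            omega
          set r := PySem.Chars.find (cs.drop k) ps with hrdef
          have hspec := PySem.Chars.find_spec hr0
          set f : Nat := k + r.toNat with hfdef
          have hfr : (k : Int) + r = (f : Int) := by omega
          have hpref : ps <+: cs.drop f := by
            have hdd : List.drop (PySem.Chars.find (List.drop k cs) ps).toNat (List.drop k cs)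
                = List.drop f cs := by
              rw [List.drop_drop, hfdef]
            rw [← hdd]
            exact hspec.1
          have hfm : f + ps.length ≤ cs.length := by
            have := hpref.length_le
            simp only [List.length_drop] at this
            omega
          rw [dif_neg (by omega : ¬ ((k : Int) + r = -1))]
          have hskip := pvBGo_skip cs ps seen ((cs.length : Int) - (ps.length : Int) + 1)
            (f - k) (k : Int) (f : Int) (by omega)
            (by
              intro p hp1 hp2 hmatch
              obtain ⟨q, rfl⟩ : ∃ q : Nat, p = (q : Int) := ⟨p.toNat, by omega⟩
              have hq1 : k ≤ q := by exact_mod_cast hp1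
              have hq2 : q < f := by exact_mod_cast hp2
              have hqpref : ps <+: (cs.drop k).drop (q - k) := by
                have hdd2 : (cs.drop k).drop (q - k) = cs.drop q := by
                  rw [List.drop_drop]; congr 1; omega
                rw [hdd2]
                exact (pvMatch_iff cs ps q).mp hmatch
              exact hspec.2 (q - k) (by omega) hqpref)
          rw [hskip]
          rw [PySem.List.pyRange_one_cons (by omega : (f : Int) < (cs.length : Int) - (ps.length : Int) + 1)]
          simp only [pvBGo]
          rw [hfr]
          -- align A's single-character slice tests with B's indexed tests
          have key1 : 0 < f →
              PySem.Chars.strIsalnum (PySem.List.slice cs (some ((f : Int) - 1)) (some (f : Int)))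
                = pvAlnumAt cs ((f : Int) - 1) := by
            intro h0
            have ha1 : ((f : Int) - 1) = ((f - 1 : Nat) : Int) := by omega
            have ha2 : (f : Int) = ((f - 1 : Nat) : Int) + 1 := by omega
            rw [ha1, ha2, pvAlnumSlice_eq cs (f - 1) (by omega)]
          have key2 : f + ps.length < cs.length →
              PySem.Chars.strIsalnum (PySem.List.slice cs (some ((f : Int) + (ps.length : Int))) (some ((f : Int) + (ps.length : Int) + 1)))
                = pvAlnumAt cs ((f : Int) + (ps.length : Int)) := by
            intro hlt
            have ha1 : (f : Int) + (ps.length : Int) = ((f + ps.length : Nat) : Int) := by push_cast; ring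
            rw [ha1, pvAlnumSlice_eq cs (f + ps.length) hlt]
          have hc1 : (0 < (f : Int) ∧ PySem.Chars.strIsalnum (PySem.List.slice cs (some ((f : Int) - 1)) (some (f : Int))) = true)
              ↔ (0 < (f : Int) ∧ pvAlnumAt cs ((f : Int) - 1) = true) := by
            constructor
            · rintro ⟨ha, hb⟩
              exact ⟨ha, by rw [← key1 (by exact_mod_cast ha)]; exact hb⟩
            · rintro ⟨ha, hb⟩
              exact ⟨ha, by rw [key1 (by exact_mod_cast ha)]; exact hb⟩
          have hc2 : ((f : Int) + (ps.length : Int) < (cs.length : Int) ∧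
                PySem.Chars.strIsalnum (PySem.List.slice cs (some ((f : Int) + (ps.length : Int))) (some ((f : Int) + (ps.length : Int) + 1))) = true)
              ↔ ((f : Int) + (ps.length : Int) < (cs.length : Int) ∧ pvAlnumAt cs ((f : Int) + (ps.length : Int)) = true) := by
            constructor
            · rintro ⟨ha, hb⟩
              exact ⟨ha, by rw [← key2 (by exact_mod_cast ha)]; exact hb⟩
            · rintro ⟨ha, hb⟩
              exact ⟨ha, by rw [key2 (by exact_mod_cast ha)]; exact hb⟩
          have hmatchf : PySem.List.slice cs (some (f : Int)) (some ((f : Int) + (ps.length : Int))) = ps :=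
            (pvMatch_iff cs ps f).mpr hpref
          by_cases hC1 : (0 < (f : Int) ∧ pvAlnumAt cs ((f : Int) - 1) = true)
          · rw [if_pos (hc1.mpr hC1)]
            rw [if_neg (fun hc => (hc.2.1 hC1))]
            have : (f : Int) + 1 = ((f + 1 : Nat) : Int) := by push_cast; ring
            rw [this]
            exact ih (f + 1) (by omega) (by omega)
          · rw [if_neg (fun hx => hC1 (hc1.mp hx))]
            by_cases hC2 : ((f : Int) + (ps.length : Int) < (cs.length : Int) ∧ pvAlnumAt cs ((f : Int) + (ps.length : Int)) = true)
            · rw [if_pos (hc2.mpr hC2)]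
              rw [if_neg (fun hc => (hc.2.2.1 hC2))]
              have : (f : Int) + 1 = ((f + 1 : Nat) : Int) := by push_cast; ring
              rw [this]
              exact ih (f + 1) (by omega) (by omega)
            · rw [if_neg (fun hx => hC2 (hc2.mp hx))]
              by_cases hC3 : (f : Int) ∈ seen
              · rw [if_pos hC3]
                rw [if_neg (fun hc => (hc.2.2.2 hC3))]
                have : (f : Int) + 1 = ((f + 1 : Nat) : Int) := by push_cast; ring
                rw [this]
                exact ih (f + 1) (by omega) (by omega)
              · rw [if_neg hC3]
                rw [if_pos ⟨hmatchf, fun hx => hC1 hx, fun hx => hC2 hx, hC3⟩]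
  -- end

-- a negative start_index is clamped by str.find exactly to B's p0
theorem pvALoop_neg (cs ps : List Char) (seen : List Int) (hm : ps ≠ []) (s : Int) (hs : s < 0) :
    pvALoop cs ps seen s = pvALoop cs ps seen (max 0 ((cs.length : Int) + s)) := by
  have hm1 : 0 < ps.length := List.length_pos_of_ne_nil hm
  have hst : pvSt (cs.length : Int) s = max 0 ((cs.length : Int) + s) := by
    unfold pvSt; split_ifs <;> omega
  by_cases hn : cs.length = 0
  · rw [pvALoop]
    rw [dif_pos (by omega : s < (cs.length : Int))]
    have hfind : PySem.Chars.findFrom cs ps s none = -1 := by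
      rw [pvFF]
      have hcs : cs = [] := List.length_eq_zero_iff.mp hn
      have : PySem.Chars.find (cs.drop (pvSt (cs.length : Int) s).toNat) ps = -1 := by
        rw [PySem.Chars.find_eq_neg_one_iff]
        intro hinf
        rw [hcs] at hinf
        simp only [List.drop_nil] at hinf
        exact hm (List.infix_nil.mp hinf)
      rw [if_neg, if_pos this]
      rw [hst]; omega
    rw [dif_pos hfind]
    rw [pvALoop]
    rw [dif_neg (by omega : ¬ (max 0 ((cs.length : Int) + s) < (cs.length : Int)))]
  · have hff : PySem.Chars.findFrom cs ps s none
        = PySem.Chars.findFrom cs ps (max 0 ((cs.length : Int) + s)) none := by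
      have hst2 : pvSt (cs.length : Int) (max 0 ((cs.length : Int) + s)) = max 0 ((cs.length : Int) + s) := by
        unfold pvSt; split_ifs <;> omega
      rw [pvFF, pvFF, hst, hst2]
    rw [pvALoop]
    conv_rhs => rw [pvALoop]
    rw [dif_pos (by omega : s < (cs.length : Int))]
    rw [dif_pos (by omega : max 0 ((cs.length : Int) + s) < (cs.length : Int))]
    rw [hff]

-- ===== VERDICT (by name: the statement is the Claim_ definition above) =====
theorem find_pii_in_text_spec : Claim_equal_find_pii_in_text := by
  intro text start_index pii seen _hdom hpre
  unfold Spec_find_pii_in_text find_pii_in_text find_pii_in_text_alt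
  have hm : pii.toList ≠ [] := by
    intro h
    apply hpre
    have h2 : pii.toList = ("" : String).toList := by simpa using h
    exact String.toList_inj.mp h2
  have hm1 : 0 < pii.toList.length := List.length_pos_of_ne_nil hm
  simp only []
  by_cases hs : 0 ≤ start_index
  · rw [if_pos hs]
    by_cases hsn : start_index ≤ (text.toList.length : Int)
    · obtain ⟨k, rfl⟩ : ∃ k : Nat, start_index = (k : Int) := ⟨start_index.toNat, by omega⟩
      exact pvMain text.toList pii.toList seen hm (text.toList.length - k) k le_rfl (by exact_mod_cast hsn)
    · rw [pvALoop]
      rw [dif_neg (by omega : ¬ (start_index < (text.toList.length : Int)))]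
      have e : PySem.List.pyRange start_index ((text.toList.length : Int) - (pii.toList.length : Int) + 1) 1 = [] := by
        rw [List.eq_nil_iff_forall_not_mem]
        intro x hx; rw [PySem.List.mem_pyRange_one] at hx; omega
      rw [e]
      rfl
  · rw [if_neg hs]
    rw [pvALoop_neg text.toList pii.toList seen hm start_index (by omega)]
    have hle : max 0 ((text.toList.length : Int) + start_index) ≤ (text.toList.length : Int) := by omega
    obtain ⟨k, hk⟩ : ∃ k : Nat, max 0 ((text.toList.length : Int) + start_index) = (k : Int) :=
      ⟨(max 0 ((text.toList.length : Int) + start_index)).toNat, by omega⟩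
    rw [hk]
    exact pvMain text.toList pii.toList seen hm (text.toList.length - k) k le_rfl (by omega)
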